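-- pv_equiv track=rewrite | github.com/leiming8886/CNCI_PLEK | code.py | TwoLineFasta
-- ===== SOURCE A (Python) =====
-- def TwoLineFasta (Seq_Array):
--     Tmp_sequence_Arr = []
--     Tmp_trans_str = ''
--     for i in range(len(Seq_Array)):
--         Seq_Array[i]=Seq_Array[i].strip()
--         if '>' in Seq_Array[i]:
--             if i == 0:
--                 Tmp_sequence_Arr.append(Seq_Array[i])
--             else:
--                 Tmp_sequence_Arr.append(Tmp_trans_str)
--                 Tmp_sequence_Arr.append(Seq_Array[i])
--                 Tmp_trans_str = ''
--         else:
--             if i == len(Seq_Array) - 1: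
--                 Tmp_trans_str = Tmp_trans_str + str(Seq_Array[i])
--                 Tmp_sequence_Arr.append(Tmp_trans_str)
--             else:
--                 Tmp_trans_str = Tmp_trans_str + str(Seq_Array[i])
--     return Tmp_sequence_Arr
-- ===== SOURCE B (Python) =====
-- def TwoLineFasta(Seq_Array):
--     for i in range(len(Seq_Array)):
--         Seq_Array[i] = Seq_Array[i].strip()
--     out = []
--     start = 0
--     for i in range(len(Seq_Array)):
--         if '>' in Seq_Array[i]:
--             if i != 0:
--                 out.append(''.join(Seq_Array[start:i]))
--             out.append(Seq_Array[i])
--             start = i + 1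
--     if Seq_Array and '>' not in Seq_Array[-1]:
--         out.append(''.join(Seq_Array[start:]))
--     return out
-- ===== Notes on version B (the rewrite author's own statement) =====
-- stated objective: alternative
-- what changed: Replaces A's single loop carrying a running concatenation string (with its special in-loop flush at the last index) by a separate in-place strip pass followed by a walk that only acts on header lines, recording slice boundaries and appending ''.join(arr[start:i]) at each header, with the trailing sequence flushed once after the loop.
import Mathlib
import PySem

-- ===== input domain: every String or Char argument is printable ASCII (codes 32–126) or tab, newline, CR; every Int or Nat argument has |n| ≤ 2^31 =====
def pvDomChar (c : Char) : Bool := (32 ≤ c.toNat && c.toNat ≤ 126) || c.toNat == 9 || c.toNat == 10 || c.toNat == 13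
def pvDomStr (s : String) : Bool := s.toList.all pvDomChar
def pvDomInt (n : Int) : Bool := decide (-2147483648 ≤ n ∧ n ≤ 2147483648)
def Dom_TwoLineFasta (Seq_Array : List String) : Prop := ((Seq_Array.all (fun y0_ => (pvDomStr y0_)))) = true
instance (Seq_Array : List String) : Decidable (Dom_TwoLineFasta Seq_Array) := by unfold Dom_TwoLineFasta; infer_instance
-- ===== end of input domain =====

-- B replaces A's running string accumulator (with its in-loop last-element flush) by a pre-strip
-- pass plus a walk that only records headers and slice boundaries, flushing joined slices; both
-- Pythons strip the caller's list in place — the equivalence proved here is about the RETURN value.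

-- ===== PORT A =====
-- the for-loop over range(len(Seq_Array)) as structural recursion over the list with index i,
-- state (accumulated output, running translation string); each line is stripped when visited,
-- exactly as A's in-place Seq_Array[i] = Seq_Array[i].strip() (later iterations only read index i)
def TwoLineFastaGo (n : Nat) : List String → Nat → List String → String → List String
  | [], _, acc, _ => acc
  | s :: rest, i, acc, tmp =>
    let s' := PySem.Str.strip s
    if PySem.Str.isIn ">" s' then
      if i = 0 then TwoLineFastaGo n rest (i+1) (acc ++ [s']) tmp
      else TwoLineFastaGo n rest (i+1) (acc ++ [tmp, s']) ""
    else
      if i = n - 1 then TwoLineFastaGo n rest (i+1) (acc ++ [tmp ++ s']) (tmp ++ s')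
      else TwoLineFastaGo n rest (i+1) acc (tmp ++ s')

def TwoLineFasta (Seq_Array : List String) : List String :=
  TwoLineFastaGo Seq_Array.length Seq_Array 0 [] ""

-- ===== PORT B =====
-- Source B's second loop: walk with index i and slice start, appending ''.join(arr[start:i]) at headers
def TwoLineFastaAltGo (arr : List String) : List String → Nat → List String → Nat → List String × Nat
  | [], _, out, start => (out, start)
  | s :: rest, i, out, start =>
    if PySem.Str.isIn ">" s then
      TwoLineFastaAltGo arr rest (i+1)
        ((if i ≠ 0 then
            out ++ [PySem.Str.join "" (PySem.List.slice arr (some (start:Int)) (some (i:Int)))]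
          else out) ++ [s]) (i+1)
    else TwoLineFastaAltGo arr rest (i+1) out start

-- Source B's trailing 'if Seq_Array and '>' not in Seq_Array[-1]' flush
def TwoLineFastaFlush (arr : List String) (p : List String × Nat) : List String :=
  if arr ≠ [] ∧ PySem.Str.isIn ">" (PySem.List.pyGetD arr (-1) "") = false then
    p.1 ++ [PySem.Str.join "" (PySem.List.slice arr (some ((p.2 : Int))) none)]
  else p.1

def TwoLineFasta_alt (Seq_Array : List String) : List String :=
  let arr := Seq_Array.map PySem.Str.strip
  TwoLineFastaFlush arr (TwoLineFastaAltGo arr arr 0 [] 0)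

-- ===== PRECONDITION & SPEC =====
def Spec_TwoLineFasta (Seq_Array : List String) (out : List String) : Prop := out = TwoLineFasta_alt Seq_Array
instance (Seq_Array : List String) (out : List String) : Decidable (Spec_TwoLineFasta Seq_Array out) := by unfold Spec_TwoLineFasta; infer_instance

-- ===== CLAIM (what is proved, stated in full; the proofs are below) =====
def Claim_equal_TwoLineFasta : Prop := ∀ (Seq_Array : List String), Dom_TwoLineFasta Seq_Array → Spec_TwoLineFasta Seq_Array (TwoLineFasta Seq_Array)

-- ===== LEMMAS AND PROOFS =====

theorem flatten_intersperse_nil {α} (l : List (List α)) :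
    (List.intersperse ([] : List α) l).flatten = l.flatten := by
  induction l with
  | nil => rfl
  | cons a t ih =>
    cases t with
    | nil => rfl
    | cons b t' => simpa [List.intersperse] using ih

theorem join_empty_append (l : List String) (s : String) :
    PySem.Str.join "" (l ++ [s]) = PySem.Str.join "" l ++ s := by
  apply String.toList_injective
  simp [PySem.Str.toList_join, PySem.Chars.join, List.intercalate, flatten_intersperse_nil]

theorem join_empty_nil : PySem.Str.join "" [] = "" := by decide

theorem main_lemma (xs : List String) (rest : List String) :
    ∀ (i : Nat) (acc : List String) (start : Nat),
    xs.drop i = rest → i + rest.length = xs.length → start ≤ i → (i = 0 ∨ rest ≠ []) →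
    TwoLineFastaGo xs.length rest i acc
        (PySem.Str.join "" (PySem.List.slice (xs.map PySem.Str.strip)
          (some (start : Int)) (some (i : Int))))
      = TwoLineFastaFlush (xs.map PySem.Str.strip)
          (TwoLineFastaAltGo (xs.map PySem.Str.strip) (rest.map PySem.Str.strip) i acc start) := by
  induction rest with
  | nil =>
    intro i acc start hdrop hlen _ hz
    have hi : i = 0 := hz.resolve_right (by simp)
    subst hi
    simp at hdrop
    subst hdrop
    simp [TwoLineFastaGo, TwoLineFastaAltGo, TwoLineFastaFlush]
  | cons s rest' ih =>
    intro i acc start hdrop hlen hst _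
    set arr := xs.map PySem.Str.strip with harrdef
    have hdropa : arr.drop i = PySem.Str.strip s :: rest'.map PySem.Str.strip := by
      rw [harrdef, ← List.map_drop, hdrop]; rfl
    have hgi : arr[i]? = some (PySem.Str.strip s) := by
      have h0 : (arr.drop i)[0]? = arr[i]? := by
        rw [List.getElem?_drop]; simp
      rw [← h0, hdropa]; rfl
    -- the segment arr[start:i] in list form
    have hseg : ∀ a b : Nat, PySem.List.slice arr (some (a:Int)) (some (b:Int))
        = (arr.drop a).take (b - a) := fun a b => PySem.List.slice_natCast arr a b
    -- extending the segment by one element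
    have hsegext : (arr.drop start).take (i - start) ++ [PySem.Str.strip s]
        = (arr.drop start).take (i + 1 - start) := by
      have h1 : i + 1 - start = (i - start) + 1 := by omega
      rw [h1, List.take_add_one]
      have h2 : (arr.drop start)[i - start]? = arr[i]? := by
        rw [List.getElem?_drop]
        congr 1
        omega
      rw [h2, hgi]
      rfl
    have hjoinext : PySem.Str.join "" ((arr.drop start).take (i - start)) ++ PySem.Str.strip s
        = PySem.Str.join "" ((arr.drop start).take (i + 1 - start)) := by
      rw [← hsegext, join_empty_append]
    simp only [List.map_cons, TwoLineFastaGo, TwoLineFastaAltGo]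
    by_cases hdr : PySem.Str.isIn ">" (PySem.Str.strip s) = true
    · -- header line
      rw [hdr]
      simp only [if_true]
      cases rest' with
      | nil =>
        -- last line is a header: no trailing flush in B, A appends tmp (if i ≠ 0) and the header
        have hlast : arr = arr.take i ++ [PySem.Str.strip s] := by
          have h := List.take_append_drop i arr
          rw [hdropa] at h
          simpa using h.symm
        simp only [List.map_nil, TwoLineFastaGo, TwoLineFastaAltGo, TwoLineFastaFlush]
        rw [show PySem.List.pyGetD arr (-1) "" = PySem.Str.strip s by
          rw [hlast]; exact PySem.List.pyGetD_neg_one_append_singleton _ _ _]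
        simp only [hdr]
        by_cases hi0 : i = 0
        · subst hi0; simp
        · simp [hi0, hseg]
      | cons r rs =>
        have hdrop' : xs.drop (i+1) = r :: rs := by
          rw [← List.tail_drop, hdrop]
          rfl
        by_cases hi0 : i = 0
        · subst hi0
          have hst0 : start = 0 := by omega
          subst hst0
          have h1 : PySem.Str.join "" (PySem.List.slice arr (some ((0:Nat):Int)) (some ((0:Nat):Int))) = "" := by
            rw [hseg]; simp [join_empty_nil]
          have h2 : PySem.Str.join "" (PySem.List.slice arr (some ((1:Nat):Int)) (some ((1:Nat):Int))) = "" := by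
            rw [hseg]; simp [join_empty_nil]
          have key := ih 1 (acc ++ [PySem.Str.strip s]) 1 hdrop'
            (by simp only [List.length_cons] at hlen ⊢; omega) (le_refl 1) (Or.inr (by simp))
          rw [h2] at key
          simpa [h1] using key
        · rw [if_neg hi0]
          have h2 : PySem.Str.join "" (PySem.List.slice arr (some ((i+1:Nat):Int)) (some ((i+1:Nat):Int))) = "" := by
            rw [hseg]; simp [join_empty_nil]
          have key := ih (i+1)
            (acc ++ [PySem.Str.join "" (PySem.List.slice arr (some (start:Int)) (some (i:Int))), PySem.Str.strip s])
            (i+1) hdrop' (by simp only [List.length_cons] at hlen ⊢; omega) (le_refl _) (Or.inr (by simp))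
          rw [h2] at key
          rw [key, if_pos hi0]
          simp [List.append_assoc]
    · -- sequence line
      rw [eq_false_of_ne_true hdr]
      simp only [Bool.false_eq_true, if_false]
      cases rest' with
      | nil =>
        -- last line, not a header: A flushes inside the loop, B after it
        have hilast : i = xs.length - 1 := by
          simp only [List.length_cons, List.length_nil] at hlen; omega
        have hlast : arr = arr.take i ++ [PySem.Str.strip s] := by
          have h := List.take_append_drop i arr
          rw [hdropa] at h
          simpa using h.symm
        simp only [List.map_nil, TwoLineFastaGo, TwoLineFastaAltGo, TwoLineFastaFlush,
          if_pos hilast]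
        rw [show PySem.List.pyGetD arr (-1) "" = PySem.Str.strip s by
          rw [hlast]; exact PySem.List.pyGetD_neg_one_append_singleton _ _ _]
        have hne : arr ≠ [] := by rw [hlast]; simp
        rw [if_pos ⟨hne, eq_false_of_ne_true hdr⟩]
        have hdropfull : arr.drop start = (arr.drop start).take (i - start) ++ [PySem.Str.strip s] := by
          have h1 : (arr.drop start).drop (i - start) = arr.drop i := by
            rw [List.drop_drop]; congr 1; omega
          have h2 := List.take_append_drop (i - start) (arr.drop start)
          rw [h1, hdropa] at h2
          simpa using h2.symm
        have hfin : PySem.Str.join "" (arr.drop start)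
            = PySem.Str.join "" ((arr.drop start).take (i - start)) ++ PySem.Str.strip s := by
          conv_lhs => rw [hdropfull]
          rw [join_empty_append]
        rw [hseg, PySem.List.slice_from_natCast, hfin]
      | cons r rs =>
        have hnotlast : ¬ (i = xs.length - 1) := by
          simp only [List.length_cons] at hlen; omega
        rw [if_neg hnotlast]
        have hdrop' : xs.drop (i+1) = r :: rs := by
          rw [← List.tail_drop, hdrop]
          rfl
        have key := ih (i+1) acc start hdrop'
          (by simp only [List.length_cons] at hlen ⊢; omega) (by omega) (Or.inr (by simp))
        have ht : PySem.Str.join "" (PySem.List.slice arr (some (start:Int)) (some ((i:Nat):Int))) ++ PySem.Str.strip s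
            = PySem.Str.join "" (PySem.List.slice arr (some (start:Int)) (some ((i+1:Nat):Int))) := by
          rw [hseg, hseg]
          exact hjoinext
        rw [ht]
        exact key

-- ===== VERDICT (by name: the statement is the Claim_ definition above) =====
theorem TwoLineFasta_spec : Claim_equal_TwoLineFasta := by
  intro xs _
  unfold Spec_TwoLineFasta TwoLineFasta TwoLineFasta_alt
  have h := main_lemma xs xs 0 [] 0 (by simp) (by simp) (le_refl 0) (Or.inl rfl)
  have h0 : PySem.Str.join "" (PySem.List.slice (xs.map PySem.Str.strip)
      (some ((0:Nat):Int)) (some ((0:Nat):Int))) = "" := by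
    rw [PySem.List.slice_natCast]; simp [join_empty_nil]
  rw [h0] at h
  simpa using h
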